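-- pv_equiv track=rewrite | github.com/Martin-Seysen/order_monster | axis_orbits/utilities/utilities_gap.py | str_complexity
-- ===== SOURCE A (Python) =====
-- def str_complexity(s):
--     if s is None:
--         return (1000,1000,1000,1000)
--     bra = op = op1 = exp = 0
--     for c in s:
--         bra += c == '('
--         op += c in ".:x"
--         op1 += c in ".:"
--         exp += c == '{'
--     return (bra, op, op1, exp, len(s))
-- ===== SOURCE B (Python) =====
-- def str_complexity(s):
--     if s is None:
--         return (1000, 1000, 1000, 1000)
--     dots = s.count('.') + s.count(':')
--     return (s.count('('), dots + s.count('x'), dots, s.count('{'), len(s))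
-- ===== Notes on version B (the rewrite author's own statement) =====
-- stated objective: faster
-- what changed: B has no loop and no threaded accumulators: it makes staged str.count library passes, one per character of interest, and assembles the tuple from those counts; this moves all per-character work to C-level scans.
import Mathlib
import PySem

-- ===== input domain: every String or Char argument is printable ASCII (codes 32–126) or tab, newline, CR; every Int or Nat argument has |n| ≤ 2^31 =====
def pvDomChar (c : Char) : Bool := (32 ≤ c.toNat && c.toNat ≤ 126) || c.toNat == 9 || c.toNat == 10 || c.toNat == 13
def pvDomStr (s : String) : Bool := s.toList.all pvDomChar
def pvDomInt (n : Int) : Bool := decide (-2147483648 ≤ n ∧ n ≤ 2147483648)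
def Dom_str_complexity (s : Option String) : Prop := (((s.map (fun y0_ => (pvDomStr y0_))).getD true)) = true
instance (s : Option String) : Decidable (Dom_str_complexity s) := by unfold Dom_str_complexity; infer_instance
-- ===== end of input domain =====

-- B replaces A's explicit loop with four threaded accumulators by loop-free staged str.count passes (measured faster, constant factor: C-level scans).

-- ===== PORT A =====
def str_complexity (s : Option String) : List Int :=
  match s with
  | none => [1000, 1000, 1000, 1000]
  | some s =>
    let r := s.toList.foldl (fun (st : Int × Int × Int × Int) c =>
      (st.1 + (if c == '(' then 1 else 0),
       st.2.1 + (if c == '.' || c == ':' || c == 'x' then 1 else 0),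
       st.2.2.1 + (if c == '.' || c == ':' then 1 else 0),
       st.2.2.2 + (if c == '{' then 1 else 0))) (0, 0, 0, 0)
    [r.1, r.2.1, r.2.2.1, r.2.2.2, PySem.Str.len s]

-- ===== PORT B =====
def str_complexity_alt (s : Option String) : List Int :=
  match s with
  | none => [1000, 1000, 1000, 1000]
  | some s =>
    let dots : Int := (PySem.Str.count s "." : Int) + (PySem.Str.count s ":" : Int)
    [(PySem.Str.count s "(" : Int), dots + (PySem.Str.count s "x" : Int), dots,
     (PySem.Str.count s "{" : Int), PySem.Str.len s]

-- ===== PRECONDITION & SPEC =====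
def Spec_str_complexity (s : Option String) (out : List Int) : Prop := out = str_complexity_alt s
instance (s : Option String) (out : List Int) : Decidable (Spec_str_complexity s out) := by unfold Spec_str_complexity; infer_instance

-- ===== CLAIM (what is proved, stated in full; the proofs are below) =====
def Claim_equal_str_complexity : Prop := ∀ (s : Option String), Dom_str_complexity s → Spec_str_complexity s (str_complexity s)

-- ===== LEMMAS AND PROOFS =====

theorem count_go_single (c : Char) (l : List Char) :
    ∀ (fuel acc : Nat), l.length ≤ fuel →
      PySem.Chars.count.go [c] fuel l acc = acc + l.count c := by
  induction l with
  | nil => intro fuel acc _; cases fuel <;> simp [PySem.Chars.count.go]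
  | cons x t ih =>
    intro fuel acc h
    cases fuel with
    | zero => simp at h
    | succ n =>
      rw [PySem.Chars.count.go]
      by_cases hx : x = c
      · simp [hx, List.isPrefixOf, List.count_cons, ih n (acc + 1) (by simpa using h)]
        omega
      · have : [c].isPrefixOf (x :: t) = false := by
          simp [List.isPrefixOf, Ne.symm hx, hx]
        simp [this, List.count_cons, hx, ih n acc (by simpa using h)]

theorem count_single (s : List Char) (c : Char) :
    PySem.Chars.count s [c] = s.count c := by
  simp [PySem.Chars.count, count_go_single c s s.length 0 le_rfl]

theorem countP_two (l : List Char) :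
    l.countP (fun c => c == '.' || c == ':') = l.count '.' + l.count ':' := by
  induction l with
  | nil => rfl
  | cons x t ih =>
    simp only [List.countP_cons, List.count_cons, ih]
    by_cases h1 : x = '.' <;> by_cases h2 : x = ':' <;> simp [h1, h2] <;> omega

theorem countP_three (l : List Char) :
    l.countP (fun c => c == '.' || c == ':' || c == 'x') =
      l.count '.' + l.count ':' + l.count 'x' := by
  induction l with
  | nil => rfl
  | cons x t ih =>
    simp only [List.countP_cons, List.count_cons, ih]
    by_cases h1 : x = '.' <;> by_cases h2 : x = ':' <;> by_cases h3 : x = 'x' <;>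
      simp [h1, h2, h3] <;> omega

-- ===== VERDICT (by name: the statement is the Claim_ definition above) =====
theorem str_complexity_spec : Claim_equal_str_complexity := by
  intro s _
  unfold Spec_str_complexity str_complexity str_complexity_alt
  cases s with
  | none => rfl
  | some s =>
    simp only [PySem.Str.count_eq]
    rw [PySem.List.foldl_prod_mk (f := fun acc (c : Char) => acc + (if c == '(' then (1:Int) else 0))
        (g := fun (st : Int × Int × Int) c =>
          (st.1 + (if c == '.' || c == ':' || c == 'x' then (1:Int) else 0),
           st.2.1 + (if c == '.' || c == ':' then (1:Int) else 0),
           st.2.2 + (if c == '{' then (1:Int) else 0)))]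
    rw [PySem.List.foldl_prod_mk (f := fun acc (c : Char) => acc + (if c == '.' || c == ':' || c == 'x' then (1:Int) else 0))
        (g := fun (st : Int × Int) c =>
          (st.1 + (if c == '.' || c == ':' then (1:Int) else 0),
           st.2 + (if c == '{' then (1:Int) else 0)))]
    rw [PySem.List.foldl_prod_mk (f := fun acc (c : Char) => acc + (if c == '.' || c == ':' then (1:Int) else 0))
        (g := fun acc (c : Char) => acc + (if c == '{' then (1:Int) else 0))]
    simp only [PySem.List.foldl_add, PySem.List.sum_map_ite_one_zero]
    have h1 : s.toList.countP (fun c => c == '(') = s.toList.count '(' := rfl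
    have h2 : s.toList.countP (fun c => c == '{') = s.toList.count '{' := rfl
    simp only [show ("(" : String).toList = ['('] from rfl,
      show ("." : String).toList = ['.'] from rfl,
      show (":" : String).toList = [':'] from rfl,
      show ("x" : String).toList = ['x'] from rfl,
      show ("{" : String).toList = ['{'] from rfl,
      count_single, h1, h2, countP_two, countP_three]
    push_cast
    ring_nf
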